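-- pv_equiv track=rewrite | github.com/dutchmanx86/excelshrinker | compression/format_detector/format_mappings.py | get_format_scale
-- ===== SOURCE A (Python) =====
-- from typing import Optional, Set
--
-- def get_format_scale(number_format: str) -> Optional[int]:
--     """
--     Detect scaling in custom formats (e.g., thousands, millions).
--
--     Format strings can include commas to scale numbers:
--     - One comma (,): divide by 1,000 (thousands)
--     - Two commas (,,): divide by 1,000,000 (millions)
--     - Three commas (,,,): divide by 1,000,000,000 (billions)
--
--     Args:
--         number_format: The Excel format string
--
--     Returns:
--         Scale divisor (1000, 1000000, etc.) or None if no scaling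
--
--     Examples:
--         >>> get_format_scale("$#,##0,")
--         1000
--         >>> get_format_scale("$#,##0,,")
--         1000000
--         >>> get_format_scale("$#,##0")
--         None
--     """
--     if not number_format:
--         return None
--
--     # Count trailing commas after the last digit placeholder
--     # Example: "$#,##0,," has 2 trailing commas
--     trailing_commas = 0
--     in_trailing = False
--
--     for char in reversed(number_format):
--         if char == ',':
--             if in_trailing:
--                 trailing_commas += 1
--             else:
--                 # First comma after digit placeholder
--                 in_trailing = True
--                 trailing_commas = 1
--         elif char in '0#?':
--             # Digit placeholder - continue checking
--             continue
--         elif in_trailing: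
--             # Hit non-comma, non-digit - stop counting
--             break
--
--     if trailing_commas > 0:
--         return 1000 ** trailing_commas
--
--     return None
-- ===== SOURCE B (Python) =====
-- def get_format_scale(number_format):
--     if not number_format:
--         return None
--     i = number_format.rfind(',')
--     if i == -1:
--         return None
--     prefix = number_format[: i + 1]
--     tail = prefix[len(prefix.rstrip(',0#?')):]
--     return 1000 ** tail.count(',')
-- ===== Notes on version B (the rewrite author's own statement) =====
-- stated objective: simpler
-- what changed: Replaces A's single reversed character loop with an in_trailing state flag by staged string operations with no explicit Python-level loop: rfind the last comma, slice the prefix up to it, rstrip the comma/placeholder character set, and count the commas in the stripped-off tail.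
import Mathlib
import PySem

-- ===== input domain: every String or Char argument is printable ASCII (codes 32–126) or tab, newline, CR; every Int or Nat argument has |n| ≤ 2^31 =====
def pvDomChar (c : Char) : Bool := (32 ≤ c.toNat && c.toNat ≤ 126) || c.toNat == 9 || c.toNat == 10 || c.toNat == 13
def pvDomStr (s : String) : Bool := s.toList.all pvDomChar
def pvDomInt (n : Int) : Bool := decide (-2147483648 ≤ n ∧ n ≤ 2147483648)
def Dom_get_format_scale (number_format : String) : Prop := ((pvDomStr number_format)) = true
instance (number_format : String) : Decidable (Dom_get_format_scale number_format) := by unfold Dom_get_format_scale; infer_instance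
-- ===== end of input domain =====

-- B replaces A's stateful reversed character loop by staged string operations — rfind the last
-- comma, slice the prefix up to it, rstrip the comma/placeholder set, count commas in the
-- stripped-off tail — a simpler decomposition a timing run also measured faster (constant factor).

-- ===== PORT A =====
-- the reversed for-loop of A: state (trailing_commas, in_trailing); 'break' = return the count
def aLoop : List Char → Nat → Bool → Nat
  | [], tc, _ => tc
  | c :: rest, tc, it =>
    if c = ',' then
      if it then aLoop rest (tc + 1) true
      else aLoop rest 1 true
    else if c = '0' ∨ c = '#' ∨ c = '?' then
      aLoop rest tc it
    else if it then tc
    else aLoop rest tc it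

def get_format_scale (number_format : String) : Option Int :=
  if number_format.toList = [] then none
  else
    let tc := aLoop number_format.toList.reverse 0 false
    if tc > 0 then some ((1000 : Int) ^ tc) else none

-- ===== PORT B =====
-- the character set ',0#?' of B's rstrip
def bStripSet (c : Char) : Bool := c == ',' || c == '0' || c == '#' || c == '?'

def get_format_scale_alt (number_format : String) : Option Int :=
  if number_format.toList = [] then none
  else
    let i := PySem.Str.rfind number_format ","
    if i = -1 then none
    else
      -- number_format[: i + 1]
      let pre := PySem.List.slice number_format.toList none (some (i + 1))
      -- prefix.rstrip(',0#?') ported by hand (exact): drop chars of the set from the right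
      let stripped := (pre.reverse.dropWhile bStripSet).reverse
      -- prefix[len(stripped):] — a slice at a nonnegative in-range index is List.drop (exact)
      let tail := pre.drop stripped.length
      some ((1000 : Int) ^ (tail.count ','))

-- ===== PRECONDITION & SPEC =====
def Spec_get_format_scale (number_format : String) (out : Option Int) : Prop := out = get_format_scale_alt number_format
instance (number_format : String) (out : Option Int) : Decidable (Spec_get_format_scale number_format out) := by unfold Spec_get_format_scale; infer_instance

-- ===== CLAIM (what is proved, stated in full; the proofs are below) =====
def Claim_equal_get_format_scale : Prop := ∀ (number_format : String), Dom_get_format_scale number_format → Spec_get_format_scale number_format (get_format_scale number_format)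

-- ===== LEMMAS AND PROOFS =====

-- A's loop in phase in_trailing = true counts the commas of the maximal prefix over ',0#?'
theorem aLoop_true (r : List Char) : ∀ tc, aLoop r tc true = tc + (r.takeWhile bStripSet).count ',' := by
  induction r with
  | nil => intro tc; simp [aLoop]
  | cons c rest ih =>
    intro tc
    by_cases h : c = ','
    · simp [aLoop, List.takeWhile, bStripSet, h, ih]
      omega
    · by_cases h2 : c = '0' ∨ c = '#' ∨ c = '?'
      · have hb : bStripSet c = true := by
          rcases h2 with h2 | h2 | h2 <;> simp [bStripSet, h2]
        have hc : (c == ',') = false := by simp [h]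
        simp [aLoop, List.takeWhile, h, h2, hb, ih]
      · have hb : bStripSet c = false := by
          have h0 : c ≠ '0' := fun hx => h2 (Or.inl hx)
          have h3 : c ≠ '#' := fun hx => h2 (Or.inr (Or.inl hx))
          have h4 : c ≠ '?' := fun hx => h2 (Or.inr (Or.inr hx))
          simp [bStripSet, h, h0, h3, h4]
        simp [aLoop, List.takeWhile, h, h2, hb]

-- A's loop in phase in_trailing = false: skip to the first comma, then count from 1
theorem aLoop_false (r : List Char) : ∀ tc, aLoop r tc false =
    match r.dropWhile (fun c => ¬ c = ',') with
    | [] => tc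
    | _ :: t => 1 + (t.takeWhile bStripSet).count ',' := by
  induction r with
  | nil => intro tc; rfl
  | cons c rest ih =>
    intro tc
    by_cases h : c = ','
    · simp [aLoop, List.dropWhile, h, aLoop_true]
    · by_cases h2 : c = '0' ∨ c = '#' ∨ c = '?'
      · simpa [aLoop, List.dropWhile, h, h2] using ih tc
      · simpa [aLoop, List.dropWhile, h, h2] using ih tc

-- rfind.go for the single-character pattern "," : -1 when there is no comma
theorem rfind_go_none (s : List Char) (hs : ',' ∉ s) : ∀ j, PySem.Chars.rfind.go s [','] j = -1 := by
  intro j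
  induction j with
  | zero =>
    unfold PySem.Chars.rfind.go
    have : ([','].isPrefixOf s) = false := by
      cases s with
      | nil => rfl
      | cons a t =>
        have : a ≠ ',' := fun h => hs (h ▸ List.mem_cons_self)
        simp [List.isPrefixOf, Ne.symm this]
    simp [this]
  | succ m ih =>
    unfold PySem.Chars.rfind.go
    have : ([','].isPrefixOf (s.drop (m + 1))) = false := by
      cases hd : s.drop (m + 1) with
      | nil => rfl
      | cons a t =>
        have ha : a ∈ s := by
          have : a ∈ s.drop (m + 1) := by rw [hd]; exact List.mem_cons_self
          exact List.mem_of_mem_drop this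
        have : a ≠ ',' := fun h => hs (h ▸ ha)
        simp [List.isPrefixOf, Ne.symm this]
    simp [this, ih]

-- rfind.go finds the highest comma position: on l = t.reverse ++ ',' :: v with no comma in v,
-- that position is t.length (for any starting index j ≥ t.length)
theorem rfind_go_found (t v : List Char) (hv : ',' ∉ v) :
    ∀ j, t.length ≤ j →
      PySem.Chars.rfind.go (t.reverse ++ ',' :: v) [','] j = (t.length : Int) := by
  intro j
  induction j with
  | zero =>
    intro h1
    have ht' : t = [] := List.length_eq_zero_iff.mp (Nat.le_zero.mp h1)
    subst ht'
    unfold PySem.Chars.rfind.go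
    simp [List.isPrefixOf]
  | succ m ih =>
    intro h1
    by_cases he : t.length = m + 1
    · -- the checked position is the comma itself
      unfold PySem.Chars.rfind.go
      have hd : (t.reverse ++ ',' :: v).drop (m + 1) = ',' :: v := by
        rw [← he, List.drop_append_of_le_length (by simp)]
        simp
      simp [hd, List.isPrefixOf, he]
    · -- position m+1 is to the right of the comma: inside v or past the end
      have hlt : t.length ≤ m := by omega
      unfold PySem.Chars.rfind.go
      have hd : (t.reverse ++ ',' :: v).drop (m + 1) = v.drop (m - t.length) := by
        rw [show t.reverse ++ ',' :: v = (t.reverse ++ [',']) ++ v by simp]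
        have hm : m + 1 = (t.reverse ++ [',']).length + (m - t.length) := by simp; omega
        rw [hm, List.drop_append]
        have hnil : (t.reverse ++ [',']).drop ((t.reverse ++ [',']).length + (m - t.length)) = [] := by
          apply List.drop_eq_nil_of_le; omega
        rw [hnil]
        simp
      have hpre : ([','].isPrefixOf ((t.reverse ++ ',' :: v).drop (m + 1))) = false := by
        rw [hd]
        cases hdv : v.drop (m - t.length) with
        | nil => rfl
        | cons a w =>
          have ha : a ∈ v := by
            have : a ∈ v.drop (m - t.length) := by rw [hdv]; exact List.mem_cons_self
            exact List.mem_of_mem_drop this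
          have : a ≠ ',' := fun h => hv (h ▸ ha)
          simp [List.isPrefixOf, Ne.symm this]
      simp [hpre, ih hlt]

-- the head of a dropWhile result fails the predicate
theorem dw_head {α : Type} (p : α → Bool) (c : α) (t : List α) :
    ∀ l : List α, l.dropWhile p = c :: t → p c = false := by
  intro l
  induction l with
  | nil => intro h; simp [List.dropWhile] at h
  | cons a r ih =>
    intro h
    by_cases hp : p a
    · rw [List.dropWhile_cons_of_pos hp] at h; exact ih h
    · rw [List.dropWhile_cons_of_neg hp] at h
      obtain ⟨h1, _⟩ := List.cons.inj h
      rw [h1] at hp; simpa using hp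

-- ===== VERDICT (by name: the statement is the Claim_ definition above) =====
theorem get_format_scale_spec : Claim_equal_get_format_scale := by
  intro s _
  unfold Spec_get_format_scale get_format_scale get_format_scale_alt
  by_cases he : s.toList = []
  · simp [he]
  · simp only [he, if_false, PySem.Str.rfind_eq]
    rw [show (",").toList = [','] from rfl]
    rw [aLoop_false]
    have hsplit := List.takeWhile_append_dropWhile
      (p := fun c => decide (¬ c = ',')) (l := s.toList.reverse)
    cases hsp : s.toList.reverse.dropWhile (fun c => ¬ c = ',') with
    | nil =>
      -- no comma in the string: both sides return none
      have hnc : ',' ∉ s.toList := by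
        intro hmem
        have hmr : ',' ∈ s.toList.reverse := List.mem_reverse.mpr hmem
        rw [hsp, List.append_nil] at hsplit
        have hp := List.mem_takeWhile_imp (hsplit ▸ hmr)
        simp at hp
      have hrf : PySem.Chars.rfind s.toList [','] = -1 := rfind_go_none s.toList hnc _
      simp [hrf]
    | cons c t =>
      rw [hsp] at hsplit
      have hc : c = ',' := by
        have := dw_head _ _ _ _ hsp
        simpa using this
      subst hc
      set u := s.toList.reverse.takeWhile (fun c => decide (¬ c = ',')) with hu
      have hl : s.toList = t.reverse ++ ',' :: u.reverse := by
        have : s.toList = (u ++ ',' :: t).reverse := by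
          rw [hsplit, List.reverse_reverse]
        simpa using this
      have hv : ',' ∉ u.reverse := by
        intro hm
        have hp := List.mem_takeWhile_imp (hu ▸ List.mem_reverse.mp hm)
        simp at hp
      have hrf : PySem.Chars.rfind s.toList [','] = (t.length : Int) := by
        show PySem.Chars.rfind.go s.toList [','] s.toList.length = (t.length : Int)
        rw [hl]
        exact rfind_go_found t u.reverse hv _ (by simp)
      rw [hrf]
      have hne : ¬ ((t.length : Int) = -1) := by omega
      have hslice : PySem.List.slice s.toList none (some ((t.length : Int) + 1))
          = t.reverse ++ [','] := by
        rw [PySem.List.slice_to s.toList (by omega)]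
        have hn : ((t.length : Int) + 1).toNat = t.length + 1 := by omega
        rw [hn, hl, show t.reverse ++ ',' :: u.reverse = (t.reverse ++ [',']) ++ u.reverse by simp]
        exact List.take_left' (by simp)
      simp only [hslice, hne, if_false]
      -- the rstrip of pre = t.reverse ++ [','] strips exactly the reversed takeWhile of t
      have hrev : (t.reverse ++ [',']).reverse = ',' :: t := by simp
      have hdw : (',' :: t).dropWhile bStripSet = t.dropWhile bStripSet := by
        rw [List.dropWhile_cons_of_pos (by simp [bStripSet])]
      have htw := List.takeWhile_append_dropWhile (p := bStripSet) (l := t)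
      have hpre2 : t.reverse ++ [','] =
          (t.dropWhile bStripSet).reverse ++ ((t.takeWhile bStripSet).reverse ++ [',']) := by
        calc t.reverse ++ [',']
            = (List.takeWhile bStripSet t ++ List.dropWhile bStripSet t).reverse ++ [','] := by
              rw [htw]
          _ = (t.dropWhile bStripSet).reverse ++ ((t.takeWhile bStripSet).reverse ++ [',']) := by
              rw [List.reverse_append, List.append_assoc]
      have htail : (t.reverse ++ [',']).drop
          (((t.reverse ++ [',']).reverse.dropWhile bStripSet).reverse.length)
          = (t.takeWhile bStripSet).reverse ++ [','] := by
        rw [hrev, hdw]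
        rw [hpre2]
        exact List.drop_left' (by simp)
      rw [htail]
      have hcnt : ((t.takeWhile bStripSet).reverse ++ [',']).count ','
          = 1 + (t.takeWhile bStripSet).count ',' := by
        simp [List.count_append, List.count_reverse]
        omega
      simp [hcnt]
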